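-- pv_equiv track=rewrite | github.com/Peter-beeler/TimeConstrainedBandit | policy.py | policy_routine
-- ===== SOURCE A (Python) =====
-- def policy_routine(arms, budget, t, is_time_constrain=False):
--     rel = [0] * len(arms)
--     count = 0
--     index = (t * budget) % len(arms)
--     for i in range(budget):
--         rel[(count + index) % len(arms)] = 1
--         count += 1
--     return rel
-- ===== SOURCE B (Python) =====
-- def policy_routine(arms, budget, t, is_time_constrain=False):
--     n = len(arms)
--     index = (t * budget) % n
--     return [1 if (j - index) % n < budget else 0 for j in range(n)]
-- ===== Notes on version B (the rewrite author's own statement) =====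
-- stated objective: alternative
-- what changed: Replaces A's forward fill of the budget wrap-around slots by a single map over the n positions with a modular membership test (rel[j]=1 iff (j-index)%n < budget), uniformly covering budget<=0 and budget>=n.
import Mathlib
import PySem

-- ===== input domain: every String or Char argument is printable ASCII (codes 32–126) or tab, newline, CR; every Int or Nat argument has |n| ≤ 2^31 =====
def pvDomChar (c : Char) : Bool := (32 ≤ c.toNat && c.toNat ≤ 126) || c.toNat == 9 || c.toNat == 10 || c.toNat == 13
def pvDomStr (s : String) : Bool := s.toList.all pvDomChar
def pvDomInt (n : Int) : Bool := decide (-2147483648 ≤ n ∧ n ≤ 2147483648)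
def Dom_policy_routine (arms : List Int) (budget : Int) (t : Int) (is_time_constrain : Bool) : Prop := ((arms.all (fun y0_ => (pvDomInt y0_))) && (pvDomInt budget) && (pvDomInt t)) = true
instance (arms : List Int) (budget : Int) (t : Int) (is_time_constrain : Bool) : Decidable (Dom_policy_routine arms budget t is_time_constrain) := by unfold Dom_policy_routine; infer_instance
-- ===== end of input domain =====

-- B replaces A's fill of the budget wrap-around window by a single map over the n
-- positions with a modular membership test (alternative decomposition, same cost class).

-- ===== PORT A =====
def policy_routine (arms : List Int) (budget : Int) (t : Int) (is_time_constrain : Bool) : List Int :=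
  let rel := List.replicate arms.length (0 : Int)          -- rel = [0] * len(arms)
  let index := PySem.Int.mod (t * budget) (arms.length : Int)
  -- for i in range(budget): rel[(count+index) % len(arms)] = 1; count += 1
  let st := (PySem.List.pyRange 0 budget 1).foldl
    (fun (st : List Int × Int) _i =>
      (PySem.List.pySetD st.1 (PySem.Int.mod (st.2 + index) (arms.length : Int)) 1, st.2 + 1))
    (rel, 0)
  st.1

-- ===== PORT B =====
def policy_routine_alt (arms : List Int) (budget : Int) (t : Int) (is_time_constrain : Bool) : List Int :=
  let n := (arms.length : Int)
  let index := PySem.Int.mod (t * budget) n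
  (PySem.List.pyRange 0 n 1).map (fun j => if PySem.Int.mod (j - index) n < budget then 1 else 0)

-- ===== PRECONDITION & SPEC =====
-- Pre_ excludes only the empty arms list, on which Python A raises ZeroDivisionError.
def Pre_policy_routine (arms : List Int) (budget : Int) (t : Int) (is_time_constrain : Bool) : Prop := arms ≠ []
instance (arms : List Int) (budget : Int) (t : Int) (is_time_constrain : Bool) : Decidable (Pre_policy_routine arms budget t is_time_constrain) := by unfold Pre_policy_routine; infer_instance
def pvWitness_policy_routine : List Int × Int × Int × Bool := ([1, 2, 3], 2, 5, false)

def Spec_policy_routine (arms : List Int) (budget : Int) (t : Int) (is_time_constrain : Bool) (out : List Int) : Prop := out = policy_routine_alt arms budget t is_time_constrain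
instance (arms : List Int) (budget : Int) (t : Int) (is_time_constrain : Bool) (out : List Int) : Decidable (Spec_policy_routine arms budget t is_time_constrain out) := by unfold Spec_policy_routine; infer_instance

-- ===== CLAIM (what is proved, stated in full; the proofs are below) =====
def Claim_equal_policy_routine : Prop := ∀ (arms : List Int) (budget : Int) (t : Int) (is_time_constrain : Bool), Dom_policy_routine arms budget t is_time_constrain → Pre_policy_routine arms budget t is_time_constrain → Spec_policy_routine arms budget t is_time_constrain (policy_routine arms budget t is_time_constrain)

-- ===== LEMMAS AND PROOFS =====

-- shifting by a multiple of n inside emod: ((a % n) - b) % n = (a - b) % n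
theorem pv_emod_shift (a b n : Int) : (a % n - b) % n = (a - b) % n := by
  conv_rhs => rw [Int.sub_emod]
  rw [Int.sub_emod, Int.emod_emod_of_dvd _ dvd_rfl]

-- the loop invariant: after m iterations the list equals B's membership map at bound m
theorem pv_loop_eq (n : ℕ) (hn : 0 < n) (index : ℤ) (m : ℕ) :
    (PySem.List.pyRange 0 (m : ℤ) 1).foldl
      (fun (st : List ℤ × ℤ) _i =>
        (PySem.List.pySetD st.1 (PySem.Int.mod (st.2 + index) (n : ℤ)) 1, st.2 + 1))
      (List.replicate n (0 : ℤ), 0)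
    = ((PySem.List.pyRange 0 (n : ℤ) 1).map
        (fun j => if PySem.Int.mod (j - index) (n : ℤ) < (m : ℤ) then 1 else 0), (m : ℤ)) := by
  have hnpos : (0 : ℤ) < (n : ℤ) := by exact_mod_cast hn
  have hne : (n : ℤ) ≠ 0 := ne_of_gt hnpos
  induction m with
  | zero =>
      rw [PySem.List.pyRange_one_eq_nil (by simp)]
      simp only [List.foldl_nil, Nat.cast_zero, Prod.mk.injEq]
      constructor
      · apply List.ext_getElem
        · simp [PySem.List.length_pyRange_one]
        · intro i h1 h2
          simp only [List.getElem_replicate, List.getElem_map,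
            PySem.List.getElem_pyRange_one, PySem.Int.mod_eq_emod_of_pos hnpos]
          have := Int.emod_nonneg ((0 + (i : ℤ)) - index) hne
          rw [if_neg (by omega)]
      · trivial
  | succ m ih =>
      have hcast : ((m + 1 : ℕ) : ℤ) = (m : ℤ) + 1 := by push_cast; ring
      rw [hcast, PySem.List.pyRange_one_succ_right (by positivity), List.foldl_append, ih]
      simp only [List.foldl_cons, List.foldl_nil, Prod.mk.injEq]
      constructor
      · -- the set step turns bound m into bound m+1
        simp only [PySem.Int.mod_eq_emod_of_pos hnpos]
        set r : ℤ := ((m : ℤ) + index) % (n : ℤ) with hr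
        have hr0 : 0 ≤ r := Int.emod_nonneg _ hne
        have hrn : r < (n : ℤ) := Int.emod_lt_of_pos _ hnpos
        rw [PySem.List.pySetD_of_nonneg _ _ hr0]
        apply List.ext_getElem
        · simp [PySem.List.length_pyRange_one]
        · intro i h1 h2
          simp only [List.getElem_set, List.getElem_map, PySem.List.getElem_pyRange_one]
          have hin : i < n := by
            simpa [PySem.List.length_pyRange_one] using h2
          set e : ℤ := ((0 : ℤ) + (i : ℤ) - index) % (n : ℤ) with he
          have he0 : 0 ≤ e := Int.emod_nonneg _ hne
          have hen : e < (n : ℤ) := Int.emod_lt_of_pos _ hnpos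
          by_cases hcase : r.toNat = i
          · -- the newly set slot: its residue is m % n ≤ m
            have hri : r = (i : ℤ) := by omega
            have hem : e = (m : ℤ) % (n : ℤ) := by
              rw [he, ← hri, hr, zero_add, pv_emod_shift]
              ring_nf
            have hle : e ≤ (m : ℤ) := by
              rcases lt_or_ge (m : ℤ) (n : ℤ) with h | h
              · rw [hem, Int.emod_eq_of_lt (by positivity) h]
              · omega
            rw [if_pos hcase, if_pos (by omega)]
          · -- untouched slot: residue m is excluded, bounds m and m+1 agree
            rw [if_neg hcase]
            have hiff : e < (m : ℤ) + 1 ↔ e < (m : ℤ) := by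
              constructor
              · intro h
                rcases lt_or_ge e (m : ℤ) with h' | h'
                · exact h'
                · exfalso
                  have hem : e = (m : ℤ) := by omega
                  -- then i ≡ m + index (mod n) and i < n forces i = r
                  have h1 : ((i : ℤ) - index) % (n : ℤ) = (m : ℤ) := by
                    rw [← hem, he]; ring_nf
                  have h2 : ((i : ℤ) - (index + (m : ℤ))) % (n : ℤ) = 0 := by
                    have h2' : ((i : ℤ) - index - (m : ℤ)) % (n : ℤ)
                        = ((m : ℤ) - (m : ℤ)) % (n : ℤ) := by
                      rw [← pv_emod_shift ((i : ℤ) - index) (m : ℤ) (n : ℤ), h1]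
                    rw [← sub_sub]
                    simpa using h2'
                  have h3 : (i : ℤ) % (n : ℤ) = (index + (m : ℤ)) % (n : ℤ) :=
                    Int.emod_eq_emod_iff_emod_sub_eq_zero.mpr h2
                  have h4 : (i : ℤ) % (n : ℤ) = (i : ℤ) :=
                    Int.emod_eq_of_lt (by positivity) (by exact_mod_cast hin)
                  have : r = (i : ℤ) := by
                    rw [hr, add_comm (m : ℤ) index, ← h3, h4]
                  exact hcase (by omega)
              · intro h; omega
            by_cases hlt : e < (m : ℤ)
            · rw [if_pos hlt, if_pos (hiff.mpr hlt)]
            · rw [if_neg hlt, if_neg (fun h => hlt (hiff.mp h))]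
      · trivial

-- pyRange 0 b 1 only depends on b through its nonnegative part
theorem pv_pyRange_toNat (b : ℤ) :
    PySem.List.pyRange 0 b 1 = PySem.List.pyRange 0 ((b.toNat : ℕ) : ℤ) 1 := by
  rw [PySem.List.pyRange_one, PySem.List.pyRange_one]
  have h : (b - 0).toNat = (((b.toNat : ℕ) : ℤ) - 0).toNat := by omega
  rw [h]

-- ===== VERDICT (by name: the statement is the Claim_ definition above) =====
theorem policy_routine_spec : Claim_equal_policy_routine := by
  intro arms budget t itc _ hpre
  unfold Spec_policy_routine policy_routine policy_routine_alt
  have hn : 0 < arms.length := List.length_pos_iff.mpr hpre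
  have hnpos : (0 : ℤ) < (arms.length : ℤ) := by exact_mod_cast hn
  have hne : (arms.length : ℤ) ≠ 0 := ne_of_gt hnpos
  simp only []
  rw [pv_pyRange_toNat budget,
    pv_loop_eq arms.length hn (PySem.Int.mod (t * budget) (arms.length : ℤ)) budget.toNat]
  apply List.map_congr_left
  intro j hj
  have hj' : 0 ≤ j := (PySem.List.mem_pyRange_one.mp hj).1
  have he0 : 0 ≤ PySem.Int.mod (j - PySem.Int.mod (t * budget) (arms.length : ℤ)) (arms.length : ℤ) := by
    rw [PySem.Int.mod_eq_emod_of_pos hnpos]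
    exact Int.emod_nonneg _ hne
  by_cases hb : 0 ≤ budget
  · have : ((budget.toNat : ℕ) : ℤ) = budget := Int.toNat_of_nonneg hb
    rw [this]
  · have h0 : ((budget.toNat : ℕ) : ℤ) = 0 := by omega
    rw [h0, if_neg (by omega), if_neg (by omega)]
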